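-- pv_equiv track=rewrite | github.com/smartdash-almasana/SmartPyme | factory/run_factory.py | _upsert_meta_field
-- ===== SOURCE A (Python) =====
-- def _upsert_meta_field(content: str, field_name: str, field_value: str) -> str:
--     lines = content.splitlines()
--     meta_header = None
--     meta_end = None
--     for idx, line in enumerate(lines):
--         if line.strip() == "## META":
--             meta_header = idx
--             continue
--         if meta_header is not None and line.startswith("## "):
--             meta_end = idx
--             break
--     if meta_header is None:
--         return content
--     if meta_end is None:
--         meta_end = len(lines)
--
--     prefix = f"- {field_name}:"
--     for idx in range(meta_header + 1, meta_end):
--         if lines[idx].strip().lower().startswith(prefix.lower()):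
--             lines[idx] = f"- {field_name}: {field_value}"
--             return "\n".join(lines) + ("\n" if content.endswith("\n") else "")
--
--     insert_at = meta_end
--     lines.insert(insert_at, f"- {field_name}: {field_value}")
--     return "\n".join(lines) + ("\n" if content.endswith("\n") else "")
-- ===== SOURCE B (Python) =====
-- def _fix_section(body, pref, new_line):
--     # replace the first line matching the field prefix; if none, append the field line
--     res, replaced = [], False
--     for l in body:
--         if not replaced and l.strip().lower().startswith(pref):
--             res.append(new_line)
--             replaced = True
--         else:
--             res.append(l)
--     if not replaced:
--         res.append(new_line)
--     return res
--
--
-- def _upsert_meta_field(content: str, field_name: str, field_value: str) -> str: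
--     new_line = f"- {field_name}: {field_value}"
--     pref = f"- {field_name}:".lower()
--     out = []          # lines already emitted
--     buf = None        # body of the current META section, None when outside
--     done = False      # a META section has been closed and upserted
--     for line in content.splitlines():
--         if done:
--             out.append(line)
--         elif line.strip() == "## META":
--             if buf is not None:        # a later META header restarts the section:
--                 out.extend(buf)        # flush the buffered body unchanged
--             out.append(line)
--             buf = []
--         elif buf is not None and line.startswith("## "):
--             out.extend(_fix_section(buf, pref, new_line))  # close section: upsert
--             out.append(line)
--             buf, done = None, True
--         elif buf is not None:
--             buf.append(line)
--         else:
--             out.append(line)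
--     if buf is not None:                # input ended inside the META section
--         out.extend(_fix_section(buf, pref, new_line))
--     elif not done:                     # no META header at all
--         return content
--     return "\n".join(out) + ("\n" if content.endswith("\n") else "")
-- ===== Notes on version B (the rewrite author's own statement) =====
-- stated objective: alternative
-- what changed: A scans twice over an indexed list (find header/end indices, then an index-range loop that mutates lines in place); B is a single streaming pass with a state machine (out / section buffer / done flag) that never computes an index: it buffers the META section body and upserts it when the section closes or the input ends.
import Mathlib
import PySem

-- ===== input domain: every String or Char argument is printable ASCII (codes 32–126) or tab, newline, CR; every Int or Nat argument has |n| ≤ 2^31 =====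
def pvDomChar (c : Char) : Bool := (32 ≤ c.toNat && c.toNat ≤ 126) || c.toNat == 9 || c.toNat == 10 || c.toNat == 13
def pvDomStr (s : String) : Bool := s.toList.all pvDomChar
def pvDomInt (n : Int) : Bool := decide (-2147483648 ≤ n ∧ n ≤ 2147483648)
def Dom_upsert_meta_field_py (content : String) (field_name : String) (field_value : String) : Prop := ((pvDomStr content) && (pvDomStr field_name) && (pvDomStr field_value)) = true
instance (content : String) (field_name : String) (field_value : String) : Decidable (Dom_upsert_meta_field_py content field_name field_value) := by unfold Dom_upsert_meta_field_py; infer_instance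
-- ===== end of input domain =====

-- B replaces A's two index-based scans (find header/end indices, then an index-range loop mutating
-- the line list in place) by a single streaming pass with a state machine that never computes an
-- index: it buffers the META section body and upserts it when the section closes or input ends.

-- ===== PORT A =====
-- the first 'for idx, line in enumerate(lines)' loop with its continue/break and mutable meta_header
def pvA_scan : List String → Int → Option Int → Option Int × Option Int
  | [], _, mh => (mh, none)
  | line :: rest, idx, mh =>
    if PySem.Str.strip line == "## META" then pvA_scan rest (idx + 1) (some idx)
    else if mh.isSome && PySem.Str.startswith line "## " then (mh, some idx)
    else pvA_scan rest (idx + 1) mh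

-- the 'for idx in range(meta_header + 1, meta_end)' loop: on a hit it returns the joined result at
-- once (as the Python does); falling out of the loop it inserts and joins.  lines[idx] is always in
-- range here (idx < meta_end ≤ len(lines)), so the total pyGetD form is exact.
def pvA_loop (lines : List String) (pref newLine tail : String) (e : Int) (idx : Int) : String :=
  if h : idx < e then
    if PySem.Str.startswith (PySem.Str.lower (PySem.Str.strip (PySem.List.pyGetD lines idx ""))) (PySem.Str.lower pref) then
      PySem.Str.join "\n" (PySem.List.pySetD lines idx newLine) ++ tail
    else pvA_loop lines pref newLine tail e (idx + 1)
  else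
    PySem.Str.join "\n" (PySem.List.insert lines e newLine) ++ tail
termination_by (e - idx).toNat
decreasing_by omega

def upsert_meta_field_py (content : String) (field_name : String) (field_value : String) : String :=
  let lines := PySem.Str.splitlines content
  match pvA_scan lines 0 none with
  | (none, _) => content
  | (some mh, me) =>
      pvA_loop lines ("- " ++ field_name ++ ":") ("- " ++ field_name ++ ": " ++ field_value)
        (if PySem.Str.endswith content "\n" then "\n" else "")
        (match me with | some e => e | none => PySem.List.len lines)
        (mh + 1)

-- ===== PORT B =====
-- _fix_section: the res/replaced accumulator loop, then the trailing append
def pvFix (pref nl : String) (body : List String) : List String :=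
  let p := body.foldl (fun (st : List String × Bool) l =>
    if !st.2 && PySem.Str.startswith (PySem.Str.lower (PySem.Str.strip l)) pref then (st.1 ++ [nl], true)
    else (st.1 ++ [l], st.2)) ([], false)
  if p.2 then p.1 else p.1 ++ [nl]

-- one step of the streaming state machine: state = (out, buf, done)
def pvB_step (pref nl : String) : List String × Option (List String) × Bool → String → List String × Option (List String) × Bool
  | (out, buf, done), line =>
    if done then (out ++ [line], buf, done)
    else if PySem.Str.strip line == "## META" then
      ((match buf with | some b => out ++ b | none => out) ++ [line], some [], false)
    else match buf with
      | some b =>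
        if PySem.Str.startswith line "## " then (out ++ pvFix pref nl b ++ [line], none, true)
        else (out, some (b ++ [line]), false)
      | none => (out ++ [line], none, false)

def upsert_meta_field_py_alt (content : String) (field_name : String) (field_value : String) : String :=
  let nl := "- " ++ field_name ++ ": " ++ field_value
  let pref := PySem.Str.lower ("- " ++ field_name ++ ":")
  match (PySem.Str.splitlines content).foldl (pvB_step pref nl) ([], none, false) with
  | (out, some b, _) => PySem.Str.join "\n" (out ++ pvFix pref nl b) ++ (if PySem.Str.endswith content "\n" then "\n" else "")
  | (out, none, true) => PySem.Str.join "\n" out ++ (if PySem.Str.endswith content "\n" then "\n" else "")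
  | (_, none, false) => content

-- ===== PRECONDITION & SPEC =====
def Spec_upsert_meta_field_py (content : String) (field_name : String) (field_value : String) (out : String) : Prop := out = upsert_meta_field_py_alt content field_name field_value
instance (content : String) (field_name : String) (field_value : String) (out : String) : Decidable (Spec_upsert_meta_field_py content field_name field_value out) := by unfold Spec_upsert_meta_field_py; infer_instance

-- ===== CLAIM (what is proved, stated in full; the proofs are below) =====
def Claim_equal_upsert_meta_field_py : Prop := ∀ (content : String) (field_name : String) (field_value : String), Dom_upsert_meta_field_py content field_name field_value → Spec_upsert_meta_field_py content field_name field_value (upsert_meta_field_py content field_name field_value)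

-- ===== LEMMAS AND PROOFS =====

-- proof-side vocabulary: a META line, a section-closing header line, a field-matching line
def pvMb (l : String) : Bool := PySem.Str.strip l == "## META"
def pvHb (l : String) : Bool := PySem.Str.startswith l "## " && !(pvMb l)
def pvP (pl : String) (l : String) : Bool := PySem.Str.startswith (PySem.Str.lower (PySem.Str.strip l)) pl

-- offset of the first section-closing header in a suffix (length if none)
def pvAuxEnd : List String → Nat
  | [] => 0
  | x :: r => if pvHb x then 0 else pvAuxEnd r + 1

-- index of the last META line in a list
def pvLastM : List String → Option Nat
  | [] => none
  | x :: r =>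
    match pvLastM r with
    | some i => some (i + 1)
    | none => if pvMb x then some 0 else none

-- A's replace-loop as an explicit first-hit search (absolute Int indices)
def pvHit (lines : List String) (pl : String) (e : Int) (j : Int) : Option Int :=
  if h : j < e then
    if PySem.Str.startswith (PySem.Str.lower (PySem.Str.strip (PySem.List.pyGetD lines j ""))) pl then some j
    else pvHit lines pl e (j + 1)
  else none
termination_by (e - j).toNat
decreasing_by omega

-- B's streaming pass, restated as a recursion on the section body (proof-side)
def pvSect (pref nl : String) : List String → List String → List String
  | buf, [] => pvFix pref nl buf
  | buf, x :: r =>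
    if pvMb x then buf ++ x :: pvSect pref nl [] r
    else if PySem.Str.startswith x "## " then pvFix pref nl buf ++ x :: r
    else pvSect pref nl (buf ++ [x]) r

-- finalization of the machine state (the match at the end of the port)
def pvFin (pref nl : String) (st : List String × Option (List String) × Bool) : List String :=
  match st.2.1 with
  | some b => st.1 ++ pvFix pref nl b
  | none => st.1

lemma pvAuxEnd_le (l : List String) : pvAuxEnd l ≤ l.length := by
  induction l with
  | nil => simp [pvAuxEnd]
  | cons x r ih => simp only [pvAuxEnd, List.length_cons]; split <;> omega

lemma pvScan_some (l : List String) (k m : Int) :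
    pvA_scan l k (some m) =
      ((match pvLastM (l.take (pvAuxEnd l)) with
        | some i => some (k + (i : Int))
        | none => some m),
       if pvAuxEnd l < l.length then some (k + (pvAuxEnd l : Int)) else none) := by
  induction l generalizing k m with
  | nil => simp [pvA_scan, pvAuxEnd, pvLastM]
  | cons x r ih =>
    by_cases hm : PySem.Str.strip x = "## META"
    · have hb : pvHb x = false := by simp [pvHb, pvMb, hm]
      rw [pvA_scan, if_pos (by simp [hm]), ih]
      have he : pvAuxEnd (x :: r) = pvAuxEnd r + 1 := by simp [pvAuxEnd, hb]
      rw [he, List.take_succ_cons]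
      simp only [Prod.mk.injEq]
      refine ⟨?_, ?_⟩
      · rw [pvLastM]
        rcases h : pvLastM (List.take (pvAuxEnd r) r) with _ | i
        · simp [pvMb, hm]
        · simp only []
          push_cast; ring_nf
      · simp only [List.length_cons]
        split <;> split <;> first | rfl | omega | (congr 1; push_cast; omega)
    · have hmb : pvMb x = false := by simp [pvMb, hm]
      rw [pvA_scan, if_neg (by simp [hm])]
      by_cases hs : PySem.Str.startswith x "## " = true
      · have hb : pvHb x = true := by rw [pvHb, hs, hmb]; rfl
        rw [if_pos (by simp only [Option.isSome_some, Bool.true_and]; exact hs)]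
        have he : pvAuxEnd (x :: r) = 0 := by simp [pvAuxEnd, hb]
        rw [he]
        simp [pvLastM, List.length_cons]
      · have hs' : PySem.Str.startswith x "## " = false := by
          revert hs; cases PySem.Str.startswith x "## " <;> simp
        have hb : pvHb x = false := by rw [pvHb, hs']; rfl
        rw [if_neg (by simp only [Option.isSome_some, Bool.true_and]; exact hs), ih]
        have he : pvAuxEnd (x :: r) = pvAuxEnd r + 1 := by simp [pvAuxEnd, hb]
        rw [he, List.take_succ_cons]
        simp only [Prod.mk.injEq]
        refine ⟨?_, ?_⟩
        · rw [pvLastM]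
          rcases h : pvLastM (List.take (pvAuxEnd r) r) with _ | i
          · simp [hmb]
          · simp only []
            push_cast; ring_nf
        · simp only [List.length_cons]
          split <;> split <;> first | rfl | omega | (congr 1; push_cast; omega)

lemma pvScan_none (l : List String) (k : Int) :
    pvA_scan l k none =
      match List.findIdx? pvMb l with
      | none => (none, none)
      | some i => pvA_scan (l.drop (i + 1)) (k + (i : Int) + 1) (some (k + (i : Int))) := by
  induction l generalizing k with
  | nil => simp [pvA_scan]
  | cons x r ih =>
    by_cases hm : PySem.Str.strip x = "## META"
    · have hmb : pvMb x = true := by simp [pvMb, hm]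
      rw [pvA_scan, if_pos (by simp [hm]), List.findIdx?_cons, if_pos hmb]
      simp
    · have hmb : pvMb x = false := by simp [pvMb, hm]
      rw [pvA_scan, if_neg (by simp [hm]), if_neg (by simp), ih, List.findIdx?_cons,
        if_neg (by simp [hmb])]
      rcases h : List.findIdx? pvMb r with _ | i
      · simp
      · simp only [Option.map_some, List.drop_succ_cons]
        congr 1 <;> push_cast <;> ring

lemma pvLoop_hit (lines : List String) (pref nl tail : String) (e j : Int) :
    pvA_loop lines pref nl tail e j =
      (match pvHit lines (PySem.Str.lower pref) e j with
       | none => PySem.Str.join "\n" (PySem.List.insert lines e nl)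
       | some i => PySem.Str.join "\n" (PySem.List.pySetD lines i nl)) ++ tail := by
  fun_induction pvA_loop lines pref nl tail e j with
  | case1 j h ht =>
    rw [pvHit, dif_pos h, if_pos ht]
  | case2 j h ht ih =>
    rw [pvHit, dif_pos h, if_neg ht, ih]
  | case3 j h =>
    rw [pvHit, dif_neg h]

-- pvHit over absolute indices = first hit in the segment drop j (take e lines), shifted by j
lemma pvHit_eq (lines : List String) (pl : String) : ∀ (j e : Nat), j ≤ e → e ≤ lines.length →
    pvHit lines pl (e : Int) (j : Int) =
      (List.findIdx? (pvP pl) ((lines.take e).drop j)).map (fun i => ((j + i : Nat) : Int)) := by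
  suffices H : ∀ (n j e : Nat), e - j = n → j ≤ e → e ≤ lines.length →
      pvHit lines pl (e : Int) (j : Int) =
        (List.findIdx? (pvP pl) ((lines.take e).drop j)).map (fun i => ((j + i : Nat) : Int)) by
    intro j e hje hel
    exact H (e - j) j e rfl hje hel
  intro n
  induction n with
  | zero =>
    intro j e h hje hel
    have hj : j = e := by omega
    subst hj
    rw [pvHit, dif_neg (by omega)]
    have hnil : (lines.take j).drop j = [] := List.drop_eq_nil_of_le (by simp)
    rw [hnil]
    simp
  | succ n ih =>
    intro j e h hje hel
    have hje' : j < e := by omega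
    have hjl : j < lines.length := by omega
    have hget : PySem.List.pyGetD lines (j : Int) "" = lines[j] := by
      simp [List.getElem?_eq_getElem hjl]
    have hjt : j < (lines.take e).length := by simp; omega
    have hdrop : (lines.take e).drop j = lines[j] :: (lines.take e).drop (j + 1) := by
      rw [List.drop_eq_getElem_cons hjt, List.getElem_take]
    rw [pvHit, dif_pos (by exact_mod_cast hje'), hget, hdrop, List.findIdx?_cons]
    by_cases hp : pvP pl lines[j] = true
    · rw [if_pos (by simpa [pvP] using hp), if_pos hp]
      simp
    · rw [if_neg (by simpa [pvP] using hp), if_neg hp]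
      have hc : (j : Int) + 1 = ((j + 1 : Nat) : Int) := by push_cast; ring
      rw [hc, ih (j + 1) e (by omega) (by omega) hel]
      rcases hf : List.findIdx? (pvP pl) ((lines.take e).drop (j + 1)) with _ | i
      · simp
      · simp only [Option.map_some]
        congr 1
        push_cast
        omega

-- the fold of _fix_section once a replacement happened: the rest is copied
lemma pvFixGo_true (pref nl : String) (s : List String) : ∀ (res : List String),
    s.foldl (fun (st : List String × Bool) l =>
      if !st.2 && PySem.Str.startswith (PySem.Str.lower (PySem.Str.strip l)) pref then (st.1 ++ [nl], true)
      else (st.1 ++ [l], st.2)) (res, true) = (res ++ s, true) := by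
  induction s with
  | nil => simp
  | cons x r ih =>
    intro res
    rw [List.foldl_cons]
    simp only [Bool.not_true, Bool.false_and]
    rw [if_neg (by simp), ih]
    simp

-- the fold of _fix_section before any replacement: replace the first hit and copy on
lemma pvFixGo_false (pref nl : String) (s : List String) : ∀ (res : List String),
    s.foldl (fun (st : List String × Bool) l =>
      if !st.2 && PySem.Str.startswith (PySem.Str.lower (PySem.Str.strip l)) pref then (st.1 ++ [nl], true)
      else (st.1 ++ [l], st.2)) (res, false) =
      match List.findIdx? (pvP pref) s with
      | some j => (res ++ s.take j ++ nl :: s.drop (j + 1), true)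
      | none => (res ++ s, false) := by
  induction s with
  | nil => simp
  | cons x r ih =>
    intro res
    rw [List.foldl_cons, List.findIdx?_cons]
    simp only [Bool.not_false, Bool.true_and]
    by_cases hx : pvP pref x = true
    · rw [if_pos (by exact hx), if_pos hx, pvFixGo_true]
      simp
    · rw [if_neg (by simpa [pvP] using hx), if_neg hx, ih]
      rcases h : List.findIdx? (pvP pref) r with _ | j
      · simp
      · simp

-- _fix_section = replace the first hit, else append
lemma pvFix_eq (pref nl : String) (s : List String) :
    pvFix pref nl s =
      match List.findIdx? (pvP pref) s with
      | some j => s.take j ++ nl :: s.drop (j + 1)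
      | none => s ++ [nl] := by
  rw [pvFix, pvFixGo_false]
  rcases h : List.findIdx? (pvP pref) s with _ | j <;> simp

-- closed form of the streaming section pass: flush up to the last META, fix the body, copy the rest
lemma pvSect_eq (pref nl : String) (r : List String) : ∀ (buf : List String),
    pvSect pref nl buf r =
      match pvLastM (r.take (pvAuxEnd r)) with
      | some i => buf ++ r.take (i + 1) ++ pvFix pref nl ((r.take (pvAuxEnd r)).drop (i + 1)) ++ r.drop (pvAuxEnd r)
      | none => pvFix pref nl (buf ++ r.take (pvAuxEnd r)) ++ r.drop (pvAuxEnd r) := by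
  induction r with
  | nil => intro buf; simp [pvSect, pvAuxEnd, pvLastM]
  | cons x r ih =>
    intro buf
    by_cases hm : PySem.Str.strip x = "## META"
    · have hmb : pvMb x = true := by simp [pvMb, hm]
      have hb : pvHb x = false := by simp [pvHb, hmb]
      have he : pvAuxEnd (x :: r) = pvAuxEnd r + 1 := by simp [pvAuxEnd, hb]
      rw [he, List.take_succ_cons, List.drop_succ_cons]
      simp only [pvSect, if_pos hmb]
      rw [ih [], pvLastM]
      rcases h : pvLastM (List.take (pvAuxEnd r) r) with _ | i
      · simp only [if_pos hmb, List.take_succ_cons, List.take_zero, List.drop_succ_cons,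
          List.drop_zero]
        simp
      · simp only [List.take_succ_cons, List.drop_succ_cons]
        simp
    · have hmb : pvMb x = false := by simp [pvMb, hm]
      by_cases hs : PySem.Str.startswith x "## " = true
      · have hs2 : PySem.Chars.startswith x.toList ['#', '#', ' '] = true := by simpa using hs
        have hb : pvHb x = true := by simp [pvHb, hmb, hs2]
        have he : pvAuxEnd (x :: r) = 0 := by simp [pvAuxEnd, hb]
        rw [he]
        simp [pvSect, pvLastM, hmb, hs2]
      · have hs2 : PySem.Chars.startswith x.toList ['#', '#', ' '] = false := by simpa using hs
        have hb : pvHb x = false := by simp [pvHb, hs2]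
        have he : pvAuxEnd (x :: r) = pvAuxEnd r + 1 := by simp [pvAuxEnd, hb]
        rw [he, List.take_succ_cons, List.drop_succ_cons]
        simp only [pvSect]
        rw [ih (buf ++ [x]), pvLastM]
        rcases h : pvLastM (List.take (pvAuxEnd r) r) with _ | i
        · simp [hmb, hs2]
        · simp [hmb, hs2, List.take_succ_cons, List.drop_succ_cons, List.append_assoc]

-- the machine fold after done=True copies lines
lemma pvFold_done (pref nl : String) (l : List String) : ∀ (out : List String) (b : Option (List String)),
    l.foldl (pvB_step pref nl) (out, b, true) = (out ++ l, b, true) := by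
  induction l with
  | nil => simp
  | cons x r ih => intro out b; simp [pvB_step, ih]

-- the machine fold from inside a section = pvSect, and it never returns to (none, false)
lemma pvFold_sect (pref nl : String) (l : List String) : ∀ (out buf : List String),
    pvFin pref nl (l.foldl (pvB_step pref nl) (out, some buf, false)) = out ++ pvSect pref nl buf l
    ∧ ((l.foldl (pvB_step pref nl) (out, some buf, false)).2.1 = none →
       (l.foldl (pvB_step pref nl) (out, some buf, false)).2.2 = true) := by
  induction l with
  | nil => exact fun out buf => ⟨rfl, by simp⟩
  | cons x r ih =>
    intro out buf
    rw [List.foldl_cons]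
    by_cases hm : PySem.Str.strip x = "## META"
    · have hstep : pvB_step pref nl (out, some buf, false) x = ((out ++ buf) ++ [x], some [], false) := by
        simp [pvB_step, hm]
      rw [hstep]
      obtain ⟨h1, h2⟩ := ih ((out ++ buf) ++ [x]) []
      refine ⟨?_, h2⟩
      rw [h1]
      simp [pvSect, pvMb, hm, List.append_assoc]
    · by_cases hs : PySem.Str.startswith x "## " = true
      · have hs2 : PySem.Chars.startswith x.toList ['#', '#', ' '] = true := by simpa using hs
        have hstep : pvB_step pref nl (out, some buf, false) x = (out ++ pvFix pref nl buf ++ [x], none, true) := by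
          simp [pvB_step, hm, hs2]
        rw [hstep, pvFold_done]
        refine ⟨?_, fun _ => rfl⟩
        simp [pvFin, pvSect, pvMb, hm, hs2, List.append_assoc]
      · have hs2 : PySem.Chars.startswith x.toList ['#', '#', ' '] = false := by simpa using hs
        have hstep : pvB_step pref nl (out, some buf, false) x = (out, some (buf ++ [x]), false) := by
          simp [pvB_step, hm, hs2]
        rw [hstep]
        obtain ⟨h1, h2⟩ := ih out (buf ++ [x])
        refine ⟨?_, h2⟩
        rw [h1]
        simp [pvSect, pvMb, hm, hs2]

-- the machine fold from the initial state, by cases on the first META line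
lemma pvFold_scan (pref nl : String) (l : List String) : ∀ (out : List String),
    match List.findIdx? pvMb l with
    | none => l.foldl (pvB_step pref nl) (out, none, false) = (out ++ l, none, false)
    | some i =>
        pvFin pref nl (l.foldl (pvB_step pref nl) (out, none, false))
          = out ++ l.take (i + 1) ++ pvSect pref nl [] (l.drop (i + 1))
        ∧ ((l.foldl (pvB_step pref nl) (out, none, false)).2.1 = none →
           (l.foldl (pvB_step pref nl) (out, none, false)).2.2 = true) := by
  induction l with
  | nil => intro out; simp
  | cons x r ih =>
    intro out
    rw [List.foldl_cons, List.findIdx?_cons]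
    by_cases hm : PySem.Str.strip x = "## META"
    · rw [if_pos (by simp [pvMb, hm])]
      have hstep : pvB_step pref nl (out, none, false) x = (out ++ [x], some [], false) := by
        simp [pvB_step, hm]
      rw [hstep]
      obtain ⟨h1, h2⟩ := pvFold_sect pref nl r (out ++ [x]) []
      refine ⟨?_, h2⟩
      rw [h1]
      simp
    · rw [if_neg (by simp [pvMb, hm])]
      have hstep : pvB_step pref nl (out, none, false) x = (out ++ [x], none, false) := by
        simp [pvB_step, hm]
      rw [hstep]
      have ih' := ih (out ++ [x])
      rcases h : List.findIdx? pvMb r with _ | i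
      · rw [h] at ih'
        simpa using ih'
      · rw [h] at ih'
        obtain ⟨h1, h2⟩ := ih'
        refine ⟨?_, h2⟩
        rw [h1]
        simp [List.append_assoc]

lemma pvLastM_lt : ∀ (l : List String) (i : Nat), pvLastM l = some i → i < l.length := by
  intro l
  induction l with
  | nil => intro i h; simp [pvLastM] at h
  | cons x r ih =>
    intro i h
    rw [pvLastM] at h
    rcases hr : pvLastM r with _ | j <;> rw [hr] at h
    · by_cases hx : pvMb x = true
      · rw [if_pos hx] at h
        simp only [Option.some.injEq] at h
        simp [List.length_cons]
        omega
      · rw [if_neg hx] at h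
        cases h
    · have := ih j hr
      simp only [Option.some.injEq] at h
      simp [List.length_cons]
      omega

-- no hit in the searched segment: A's insert at the section end = B's appended field line
lemma pvMain_none (L : List String) (pl nl : String) (s E : Nat) (hsE : s ≤ E) (hEl : E ≤ L.length)
    (hf : List.findIdx? (pvP pl) ((L.take E).drop s) = none) :
    PySem.List.insert L ((E : Nat) : Int) nl = L.take s ++ pvFix pl nl ((L.take E).drop s) ++ L.drop E := by
  have hFix : pvFix pl nl ((L.take E).drop s) = (L.take E).drop s ++ [nl] := by
    rw [pvFix_eq, hf]
  rw [hFix, PySem.List.insert_natCast L E nl hEl]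
  have h1 : L.take E = L.take s ++ (L.take E).drop s := by
    conv_lhs => rw [← List.take_append_drop s (L.take E)]
    rw [List.take_take, min_eq_left hsE]
  conv_lhs => rw [h1]
  simp

-- first hit at offset j of the segment: A's in-place set = B's replaced line
lemma pvMain_some (L : List String) (pl nl : String) (s E j : Nat) (hsE : s ≤ E) (hEl : E ≤ L.length)
    (hf : List.findIdx? (pvP pl) ((L.take E).drop s) = some j) :
    PySem.List.pySetD L (((s + j : Nat)) : Int) nl = L.take s ++ pvFix pl nl ((L.take E).drop s) ++ L.drop E := by
  have hjlen : j < ((L.take E).drop s).length := (List.findIdx?_eq_some_iff_findIdx_eq.mp hf).1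
  have hlen : ((L.take E).drop s).length = E - s := by simp; omega
  have hjE : s + j < E := by omega
  have hFix : pvFix pl nl ((L.take E).drop s)
      = ((L.take E).drop s).take j ++ nl :: ((L.take E).drop s).drop (j + 1) := by
    rw [pvFix_eq, hf]
  rw [hFix, PySem.List.pySetD_natCast, List.set_eq_take_cons_drop nl (by omega)]
  have ht : L.take (s + j) = L.take s ++ (L.drop s).take j := List.take_add
  have hseg : (L.take E).drop s = (L.drop s).take (E - s) := List.drop_take
  have htj : ((L.take E).drop s).take j = (L.drop s).take j := by
    rw [hseg, List.take_take, min_eq_left (by omega)]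
  have hdj : ((L.take E).drop s).drop (j + 1) ++ L.drop E = L.drop (s + j + 1) := by
    rw [hseg, List.drop_take, List.drop_drop]
    have hE : L.drop E = (L.drop (s + (j + 1))).drop (E - s - (j + 1)) := by
      rw [List.drop_drop]
      congr 1
      omega
    rw [hE, List.take_append_drop, Nat.add_assoc]
  rw [ht, htj, ← hdj]
  simp

-- B's relative (take/drop of the suffix after the META header) pieces, in absolute form
lemma pvBshape_none (L : List String) (pl nl : String) (k e : Nat) :
    L.take k ++ pvFix pl nl ((L.drop k).take e) ++ (L.drop k).drop e
      = L.take k ++ pvFix pl nl ((L.take (k + e)).drop k) ++ L.drop (k + e) := by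
  have hseg : (L.take (k + e)).drop k = (L.drop k).take e := by
    rw [List.drop_take]
    congr 1
    omega
  have hdr : (L.drop k).drop e = L.drop (k + e) := by
    rw [List.drop_drop]
  rw [hseg, hdr]

lemma pvBshape_some (L : List String) (pl nl : String) (k e i : Nat) :
    L.take k ++ ((L.drop k).take (i + 1) ++ (pvFix pl nl (((L.drop k).take e).drop (i + 1)) ++ (L.drop k).drop e))
      = L.take (k + i + 1) ++ pvFix pl nl ((L.take (k + e)).drop (k + i + 1)) ++ L.drop (k + e) := by
  have h1 : L.take (k + i + 1) = L.take k ++ (L.drop k).take (i + 1) := by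
    have : k + i + 1 = k + (i + 1) := by omega
    rw [this, List.take_add]
  have h2 : (L.take (k + e)).drop (k + i + 1) = ((L.drop k).take e).drop (i + 1) := by
    rw [List.drop_take, List.drop_take, List.drop_drop]
    have e1 : k + e - (k + i + 1) = e - (i + 1) := by omega
    rw [e1]
    have e3 : k + i + 1 = k + (i + 1) := by omega
    rw [e3]
  have h3 : L.drop (k + e) = (L.drop k).drop e := by rw [List.drop_drop]
  rw [h1, h2, h3]
  simp

-- ===== VERDICT (by name: the statement is the Claim_ definition above) =====
set_option maxHeartbeats 1600000 in
theorem upsert_meta_field_py_spec : Claim_equal_upsert_meta_field_py := by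
  intro content fn fv _
  unfold Spec_upsert_meta_field_py
  rcases hfi : List.findIdx? pvMb (PySem.Str.splitlines content) with _ | h0
  · -- no '## META' line: both sides return the raw content
    have hB := pvFold_scan (PySem.Str.lower ("- " ++ fn ++ ":")) ("- " ++ fn ++ ": " ++ fv)
      (PySem.Str.splitlines content) []
    rw [hfi] at hB
    unfold upsert_meta_field_py upsert_meta_field_py_alt
    simp only [pvScan_none, hfi, hB]
  · have hlen0 : h0 < (PySem.Str.splitlines content).length :=
      (List.findIdx?_eq_some_iff_findIdx_eq.mp hfi).1
    have hB := pvFold_scan (PySem.Str.lower ("- " ++ fn ++ ":")) ("- " ++ fn ++ ": " ++ fv)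
      (PySem.Str.splitlines content) []
    rw [hfi] at hB
    obtain ⟨hB1, hB2⟩ := hB
    -- B's value, via the fold characterization
    have hBval : upsert_meta_field_py_alt content fn fv
        = PySem.Str.join "\n"
            ((PySem.Str.splitlines content).take (h0 + 1)
              ++ pvSect (PySem.Str.lower ("- " ++ fn ++ ":")) ("- " ++ fn ++ ": " ++ fv)
                  [] ((PySem.Str.splitlines content).drop (h0 + 1)))
            ++ (if PySem.Str.endswith content "\n" then "\n" else "") := by
      unfold upsert_meta_field_py_alt
      rcases hst : List.foldl
          (pvB_step (PySem.Str.lower ("- " ++ fn ++ ":")) ("- " ++ fn ++ ": " ++ fv))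
          ([], none, false) (PySem.Str.splitlines content) with ⟨out, ob, d⟩
      rw [hst] at hB1 hB2
      simp only [hst]
      rcases ob with _ | b
      · cases d
        · exact absurd (hB2 rfl) (by simp)
        · simp only [pvFin, List.nil_append] at hB1
          dsimp only
          rw [hB1]
      · simp only [pvFin, List.nil_append] at hB1
        dsimp only
        rw [hB1]
    rw [hBval]
    unfold upsert_meta_field_py
    simp only [pvScan_none, hfi, zero_add, pvScan_some]
    rw [pvSect_eq]
    set L := PySem.Str.splitlines content with hLdef
    set pl := PySem.Str.lower ("- " ++ fn ++ ":") with hpl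
    set nl := "- " ++ fn ++ ": " ++ fv with hnl
    set r := L.drop (h0 + 1) with hrdef
    set e := pvAuxEnd r with hedef
    have hrlen : r.length = L.length - (h0 + 1) := by rw [hrdef]; simp
    have heR : e ≤ r.length := pvAuxEnd_le r
    rcases hlm : pvLastM (r.take e) with _ | i
    all_goals by_cases hend : e < r.length
    all_goals simp only [hend, if_true, if_false]
    all_goals rw [pvLoop_hit]
    -- in the no-closing-header branches the loop bound len L equals h0+1+e
    case neg =>
      rw [show PySem.List.len L = ((h0 + 1 + e : Nat) : Int) from by
            simp only [PySem.List.len_eq]; push_cast; omega,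
          show ((h0 : Int) + 1) = ((h0 + 1 : Nat) : Int) from by push_cast; ring,
          pvHit_eq L pl (h0 + 1) (h0 + 1 + e) (by omega) (by omega)]
      rcases hf : List.findIdx? (pvP pl) ((L.take (h0 + 1 + e)).drop (h0 + 1)) with _ | j
      · simp only [Option.map_none]
        congr 2
        rw [pvMain_none L pl nl (h0 + 1) (h0 + 1 + e) (by omega) (by omega) hf,
            ← pvBshape_none L pl nl (h0 + 1) e]
        simp only [← hrdef, List.nil_append, List.append_assoc]
      · simp only [Option.map_some]
        congr 2
        rw [pvMain_some L pl nl (h0 + 1) (h0 + 1 + e) j (by omega) (by omega) hf,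
            ← pvBshape_none L pl nl (h0 + 1) e]
        simp only [← hrdef, List.nil_append, List.append_assoc]
    case neg =>
      have hi := pvLastM_lt _ i hlm
      simp only [List.length_take] at hi
      rw [show PySem.List.len L = ((h0 + 1 + e : Nat) : Int) from by
            simp only [PySem.List.len_eq]; push_cast; omega,
          show ((h0 : Int) + 1 + (i : Int) + 1) = ((h0 + 1 + i + 1 : Nat) : Int) from by push_cast; ring,
          pvHit_eq L pl (h0 + 1 + i + 1) (h0 + 1 + e) (by omega) (by omega)]
      rcases hf : List.findIdx? (pvP pl) ((L.take (h0 + 1 + e)).drop (h0 + 1 + i + 1)) with _ | j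
      · simp only [Option.map_none]
        congr 2
        rw [pvMain_none L pl nl (h0 + 1 + i + 1) (h0 + 1 + e) (by omega) (by omega) hf,
            ← pvBshape_some L pl nl (h0 + 1) e i]
        simp only [← hrdef, List.nil_append, List.append_assoc]
      · simp only [Option.map_some]
        congr 2
        rw [pvMain_some L pl nl (h0 + 1 + i + 1) (h0 + 1 + e) j (by omega) (by omega) hf,
            ← pvBshape_some L pl nl (h0 + 1) e i]
        simp only [← hrdef, List.nil_append, List.append_assoc]
    -- closing header present, no META after the first inside the section
    case pos =>
      rw [show ((h0 : Int) + 1 + (e : Int)) = ((h0 + 1 + e : Nat) : Int) from by push_cast; ring,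
          show ((h0 : Int) + 1) = ((h0 + 1 : Nat) : Int) from by push_cast; ring,
          pvHit_eq L pl (h0 + 1) (h0 + 1 + e) (by omega) (by omega)]
      rcases hf : List.findIdx? (pvP pl) ((L.take (h0 + 1 + e)).drop (h0 + 1)) with _ | j
      · simp only [Option.map_none]
        congr 2
        rw [pvMain_none L pl nl (h0 + 1) (h0 + 1 + e) (by omega) (by omega) hf,
            ← pvBshape_none L pl nl (h0 + 1) e]
        simp only [← hrdef, List.nil_append, List.append_assoc]
      · simp only [Option.map_some]
        congr 2
        rw [pvMain_some L pl nl (h0 + 1) (h0 + 1 + e) j (by omega) (by omega) hf,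
            ← pvBshape_none L pl nl (h0 + 1) e]
        simp only [← hrdef, List.nil_append, List.append_assoc]
    case pos =>
      have hi := pvLastM_lt _ i hlm
      simp only [List.length_take] at hi
      rw [show ((h0 : Int) + 1 + (e : Int)) = ((h0 + 1 + e : Nat) : Int) from by push_cast; ring,
          show ((h0 : Int) + 1 + (i : Int) + 1) = ((h0 + 1 + i + 1 : Nat) : Int) from by push_cast; ring,
          pvHit_eq L pl (h0 + 1 + i + 1) (h0 + 1 + e) (by omega) (by omega)]
      rcases hf : List.findIdx? (pvP pl) ((L.take (h0 + 1 + e)).drop (h0 + 1 + i + 1)) with _ | j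
      · simp only [Option.map_none]
        congr 2
        rw [pvMain_none L pl nl (h0 + 1 + i + 1) (h0 + 1 + e) (by omega) (by omega) hf,
            ← pvBshape_some L pl nl (h0 + 1) e i]
        simp only [← hrdef, List.nil_append, List.append_assoc]
      · simp only [Option.map_some]
        congr 2
        rw [pvMain_some L pl nl (h0 + 1 + i + 1) (h0 + 1 + e) j (by omega) (by omega) hf,
            ← pvBshape_some L pl nl (h0 + 1) e i]
        simp only [← hrdef, List.nil_append, List.append_assoc]
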